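-- pv_equiv track=rewrite | github.com/GabyWg/AED | TP2/functions.py | valid_address
-- ===== SOURCE A (Python) =====
-- def valid_address(address_line): # Validacion de la direccion
--
--     char_ant = '1'
--
--     flg_digits = flg_char = flag_word_digit= False
--
--     for char in address_line:
--
--         if not('a' <= char.lower() <= 'z' or '0' <= char <= '9' or char in ('.',' ')): # Busqueda de caracteres especiales
--             return False
--
--         elif char != ' ' and char != '.':
--
--             if 'A' <= char <= 'Z' and 'A' <= char_ant <= 'Z': # Busqueda de mayusculas seguidas
--                 return False
--
--             elif 'a' <= char.lower() <= 'z':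
--                 flg_char = True
--             elif '0' <= char <= '9':
--                 flg_digits = True
--         else:
--             if flg_digits and not flg_char:
--                 flag_word_digit = True
--             flg_digits = flg_char = False
--         char_ant = char
--
--     if  flag_word_digit:
--         return True
--     else:
--         return False
-- ===== SOURCE B (Python) =====
-- ALLOWED = set("abcdefghijklmnopqrstuvwxyzABCDEFGHIJKLMNOPQRSTUVWXYZ0123456789. ")
--
--
-- def valid_address(address_line):
--     # one pass: reject any character outside the allowed alphabet
--     if any(c not in ALLOWED for c in address_line):
--         return False
--     # one pass over adjacent pairs: reject two consecutive uppercase letters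
--     if any('A' <= x <= 'Z' and 'A' <= y <= 'Z'
--            for x, y in zip(address_line, address_line[1:])):
--         return False
--     # tokenize on both separators; only words followed by a separator count
--     words = ''.join(' ' if c == '.' else c for c in address_line).split(' ')
--     return any(w.isdigit() for w in words[:-1])
-- ===== Notes on version B (the rewrite author's own statement) =====
-- stated objective: simpler
-- what changed: A's single stateful scan (previous-char register plus three flags reset at separators) is replaced by three independent passes: a character-set filter, a zip scan over adjacent pairs for double uppercase, and a tokenize step that tests only the words before the last token (words[:-1]) for being all digits.
import Mathlib
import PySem

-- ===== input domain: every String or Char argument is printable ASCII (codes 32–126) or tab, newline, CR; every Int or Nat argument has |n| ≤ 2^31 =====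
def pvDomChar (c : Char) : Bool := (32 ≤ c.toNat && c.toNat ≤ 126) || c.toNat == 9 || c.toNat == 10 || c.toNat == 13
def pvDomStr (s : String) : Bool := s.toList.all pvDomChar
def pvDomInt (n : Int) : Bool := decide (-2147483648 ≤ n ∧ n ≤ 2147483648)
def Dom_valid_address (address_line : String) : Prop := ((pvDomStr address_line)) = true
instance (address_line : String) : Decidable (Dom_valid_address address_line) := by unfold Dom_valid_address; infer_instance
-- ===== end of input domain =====

-- B re-implements A's single stateful scan as three independent passes (character filter,
-- adjacent-uppercase zip scan, tokenize-and-test on words[:-1]); same return value, objective: simpler decomposition.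

-- ===== PORT A =====
-- A's character tests ('a' <= char.lower() <= 'z', '0' <= char <= '9', 'A' <= char <= 'Z')
def aLetter (c : Char) : Bool := decide ('a' ≤ PySem.Chars.lowerChar c) && decide (PySem.Chars.lowerChar c ≤ 'z')
def aDigit (c : Char) : Bool := decide ('0' ≤ c) && decide (c ≤ '9')
def aUpper (c : Char) : Bool := decide ('A' ≤ c) && decide (c ≤ 'Z')

-- the for-loop of A; state = (char_ant, flg_digits, flg_char, flag_word_digit)
def aLoop : List Char → Char → Bool → Bool → Bool → Bool
  | [], _, _, _, flag_word_digit => flag_word_digit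
  | c :: rest, char_ant, flg_digits, flg_char, flag_word_digit =>
    if !(aLetter c || aDigit c || (c == '.' || c == ' ')) then false
    else if c != ' ' && c != '.' then
      if aUpper c && aUpper char_ant then false
      else if aLetter c then aLoop rest c flg_digits true flag_word_digit
      else if aDigit c then aLoop rest c true flg_char flag_word_digit
      else aLoop rest c flg_digits flg_char flag_word_digit
    else aLoop rest c false false (if flg_digits && !flg_char then true else flag_word_digit)

def valid_address (address_line : String) : Bool :=
  if aLoop address_line.toList '1' false false false then true else false

-- ===== PORT B =====
-- membership in B's ALLOWED set literal, written as the character classes it contains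
def bAllowed (c : Char) : Bool :=
  (decide ('a' ≤ c) && decide (c ≤ 'z')) || (decide ('A' ≤ c) && decide (c ≤ 'Z')) ||
    (decide ('0' ≤ c) && decide (c ≤ '9')) || c == '.' || c == ' '
def bUpper (c : Char) : Bool := decide ('A' ≤ c) && decide (c ≤ 'Z')

def valid_address_alt (address_line : String) : Bool :=
  let l := address_line.toList
  if l.any (fun c => !bAllowed c) then false
  else if (l.zip (l.drop 1)).any (fun p => bUpper p.1 && bUpper p.2) then false
  else
    let words := PySem.Chars.splitOn (l.map fun c => if c == '.' then ' ' else c) [' ']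
    words.dropLast.any PySem.Chars.strIsdigit

-- ===== PRECONDITION & SPEC =====
def Spec_valid_address (address_line : String) (out : Bool) : Prop := out = valid_address_alt address_line
instance (address_line : String) (out : Bool) : Decidable (Spec_valid_address address_line out) := by unfold Spec_valid_address; infer_instance

-- ===== CLAIM (what is proved, stated in full; the proofs are below) =====
def Claim_equal_valid_address : Prop := ∀ (address_line : String), Dom_valid_address address_line → Spec_valid_address address_line (valid_address address_line)

-- ===== LEMMAS AND PROOFS =====

-- proof-side vocabulary
def sepC (c : Char) : Bool := c == ' ' || c == '.'
def okA (c : Char) : Bool := aLetter c || aDigit c || (c == '.' || c == ' ')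
def normC (c : Char) : Char := if c == '.' then ' ' else c

def noPair : List Char → Bool
  | [] => true
  | [_] => true
  | a :: b :: r => !(aUpper a && aUpper b) && noPair (b :: r)

def H : List Char → Bool → Bool → Bool
  | [], _, _ => false
  | c :: r, fd, fc =>
    if sepC c then ((fd && !fc) || H r false false)
    else if aLetter c then H r fd true
    else if aDigit c then H r true fc
    else H r fd fc

def mySplit (d : Char) : List Char → List (List Char)
  | [] => [[]]
  | c :: r =>
    if c == d then [] :: mySplit d r
    else match mySplit d r with
      | [] => [[c]]
      | w :: ws => (c :: w) :: ws

def frontApp (w : List Char) : List (List Char) → List (List Char)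
  | [] => [w]
  | x :: xs => (w ++ x) :: xs

def Q : Bool → Bool → List (List Char) → Bool
  | _, _, [] => false
  | _, _, [_] => false
  | fd, fc, w :: x :: ws => ((fd || w.any aDigit) && !(fc || w.any aLetter)) || Q false false (x :: ws)

-- character-level facts
theorem char_le_iff (a b : Char) : (a ≤ b) ↔ a.toNat ≤ b.toNat := by
  rw [Char.le_def]; exact UInt32.le_iff_toNat_le

theorem lowerChar_toNat (c : Char) :
    (PySem.Chars.lowerChar c).toNat = if 65 ≤ c.toNat ∧ c.toNat ≤ 90 then c.toNat + 32 else c.toNat := by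
  unfold PySem.Chars.lowerChar PySem.Chars.isupper
  by_cases h : 65 ≤ c.toNat ∧ c.toNat ≤ 90
  · have hA : ('A' ≤ c) := by rw [char_le_iff]; exact h.1
    have hZ : (c ≤ 'Z') := by rw [char_le_iff]; exact h.2
    have hv : (c.toNat + 32).isValidChar := by constructor; omega
    simp [hA, hZ, h, Char.toNat_ofNat, hv]
  · rw [if_neg h]
    have : ¬ ('A' ≤ c ∧ c ≤ 'Z') := by rw [char_le_iff, char_le_iff]; exact h
    rcases Decidable.not_and_iff_or_not.mp this with h' | h' <;> simp [h']

theorem aLetter_eq (c : Char) :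
    aLetter c = ((decide ('a' ≤ c) && decide (c ≤ 'z')) || (decide ('A' ≤ c) && decide (c ≤ 'Z'))) := by
  unfold aLetter
  simp only [char_le_iff, lowerChar_toNat,
    (show 'a'.toNat = 97 from rfl), (show 'z'.toNat = 122 from rfl),
    (show 'A'.toNat = 65 from rfl), (show 'Z'.toNat = 90 from rfl)]
  by_cases h : 65 ≤ c.toNat ∧ c.toNat ≤ 90 <;> simp [h] <;> omega

theorem aDigit_not_aLetter (c : Char) (h : aDigit c = true) : aLetter c = false := by
  rw [aLetter_eq]
  unfold aDigit at h
  simp only [char_le_iff, Bool.and_eq_true, decide_eq_true_eq] at h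
  simp only [char_le_iff]
  simp only [Bool.or_eq_false_iff, Bool.and_eq_false_iff, decide_eq_false_iff_not,
    (show '0'.toNat = 48 from rfl), (show '9'.toNat = 57 from rfl),
    (show 'a'.toNat = 97 from rfl), (show 'z'.toNat = 122 from rfl),
    (show 'A'.toNat = 65 from rfl), (show 'Z'.toNat = 90 from rfl)] at h ⊢
  omega

theorem okA_eq_bAllowed (c : Char) : okA c = bAllowed c := by
  unfold okA bAllowed
  rw [aLetter_eq]
  unfold aDigit
  cases h1 : (decide ('a' ≤ c) && decide (c ≤ 'z')) <;>
    cases h2 : (decide ('A' ≤ c) && decide (c ≤ 'Z')) <;>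
      cases h3 : (decide ('0' ≤ c) && decide (c ≤ '9')) <;>
        cases h4 : (c == '.') <;> cases h5 : (c == ' ') <;> rfl

theorem sep_not_upper (c : Char) (h : sepC c = true) : aUpper c = false := by
  unfold sepC at h
  rcases Bool.or_eq_true_iff.mp h with h' | h' <;>
    · have := beq_iff_eq.mp h'; subst this; decide

-- characterization of A's loop
theorem aLoop_eq (l : List Char) : ∀ prev fd fc fw,
    aLoop l prev fd fc fw = (l.all okA && noPair (prev :: l) && (fw || H l fd fc)) := by
  induction l with
  | nil => intro prev fd fc fw; simp [aLoop, noPair, H]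
  | cons c r ih =>
    intro prev fd fc fw
    by_cases hok : okA c
    · by_cases hsep : sepC c
      · have hne : (c != ' ' && c != '.') = false := by
          unfold sepC at hsep
          rcases Bool.or_eq_true_iff.mp hsep with h' | h' <;> simp [beq_iff_eq.mp h']
        have : aLoop (c :: r) prev fd fc fw
            = aLoop r c false false (if fd && !fc then true else fw) := by
          unfold okA at hok
          simp only [aLoop, hok, Bool.not_true, Bool.false_eq_true, if_false, hne]
        rw [this, ih]
        have hup : aUpper c = false := sep_not_upper c hsep
        simp only [H, hsep, if_true, noPair, hup, List.all_cons, (by unfold okA at hok; exact hok : okA c = true)]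
        cases fd <;> cases fc <;> cases fw <;> simp [H]
      · have hne : (c != ' ' && c != '.') = true := by
          unfold sepC at hsep
          simp only [Bool.or_eq_true_iff, beq_iff_eq] at hsep
          push_neg at hsep
          simp [bne_iff_ne, hsep.1, hsep.2]
        by_cases hpair : (aUpper c && aUpper prev) = true
        · have : aLoop (c :: r) prev fd fc fw = false := by
            unfold okA at hok
            simp only [aLoop, hok, Bool.not_true, Bool.false_eq_true, if_false, hne, if_true, hpair]
          rw [this]
          have : noPair (prev :: c :: r) = false := by
            simp only [noPair]
            rcases Bool.and_eq_true_iff.mp hpair with ⟨h1, h2⟩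
            simp [h1, h2]
          simp [this]
        · have hnp : noPair (prev :: c :: r) = noPair (c :: r) := by
            simp only [noPair]
            have : (aUpper prev && aUpper c) = false := by
              cases h1 : aUpper prev <;> cases h2 : aUpper c <;> simp_all
            simp [this]
          have hHstep : ∀ fd fc, H (c :: r) fd fc =
              (if aLetter c then H r fd true else if aDigit c then H r true fc else H r fd fc) := by
            intro fd fc; simp only [H, hsep, Bool.false_eq_true, if_false]
          have hA : aLoop (c :: r) prev fd fc fw =
              (if aLetter c then aLoop r c fd true fw
               else if aDigit c then aLoop r c true fc fw
               else aLoop r c fd fc fw) := by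
            unfold okA at hok
            simp only [aLoop, hok, Bool.not_true, Bool.false_eq_true, if_false, hne, if_true, hpair]
          rw [hA]
          by_cases hl : aLetter c
          · simp only [hl, if_true, ih, hHstep, hnp, List.all_cons,
              (by unfold okA at hok; exact hok : okA c = true), Bool.true_and]
          · by_cases hd : aDigit c
            · simp only [hl, hd, Bool.false_eq_true, if_false, if_true, ih, hHstep, hnp, List.all_cons,
                (by unfold okA at hok; exact hok : okA c = true), Bool.true_and]
            · simp only [hl, hd, Bool.false_eq_true, if_false, ih, hHstep, hnp, List.all_cons,
                (by unfold okA at hok; exact hok : okA c = true), Bool.true_and]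
    · have h1 : aLoop (c :: r) prev fd fc fw = false := by
        unfold okA at hok
        simp only [aLoop, Bool.not_eq_true'] at *
        simp [hok]
      have h2 : List.all (c :: r) okA = false := by
        simp only [List.all_cons, Bool.and_eq_false_iff]
        left; exact Bool.not_eq_true _ ▸ (by simpa using hok)
      simp [h1, h2]

-- noPair as B's zip-scan
theorem noPair_eq_zip (l : List Char) :
    noPair l = !((l.zip (l.drop 1)).any (fun p => bUpper p.1 && bUpper p.2)) := by
  induction l with
  | nil => rfl
  | cons a r ih =>
    cases r with
    | nil => rfl
    | cons b r' =>
      show noPair (a :: b :: r') = _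
      simp only [noPair, List.drop_succ_cons, List.drop_zero, List.zip_cons_cons, List.any_cons]
      rw [ih]
      show _ = !((bUpper a && bUpper b) || _)
      have : bUpper = aUpper := rfl
      rw [this]
      cases (aUpper a && aUpper b) <;> simp

theorem noPair_one_cons (l : List Char) : noPair ('1' :: l) = noPair l := by
  cases l with
  | nil => rfl
  | cons c r => simp [noPair, (by decide : aUpper '1' = false)]

-- splitOn = mySplit for a single-character separator
theorem mySplit_cons (d c : Char) (r : List Char) :
    mySplit d (c :: r) = if c == d then [] :: mySplit d r
      else match mySplit d r with | [] => [[c]] | w :: ws => (c :: w) :: ws := rfl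

theorem mySplit_ne_nil (d : Char) (l : List Char) : mySplit d l ≠ [] := by
  cases l with
  | nil => simp [mySplit]
  | cons c r =>
    unfold mySplit
    by_cases h : c == d
    · simp [h]
    · simp only [h, Bool.false_eq_true, if_false]
      cases mySplit d r <;> simp

theorem frontApp_nil (m : List (List Char)) (h : m ≠ []) : frontApp [] m = m := by
  cases m with
  | nil => exact absurd rfl h
  | cons x xs => simp [frontApp]

theorem go_eq (d : Char) : ∀ fuel (l cur : List Char) acc, l.length < fuel →
    PySem.Chars.splitOn.go [d] fuel l cur acc = acc.reverse ++ frontApp cur.reverse (mySplit d l) := by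
  intro fuel
  induction fuel with
  | zero => intro l cur acc h; omega
  | succ fuel ih =>
    intro l cur acc h
    cases l with
    | nil =>
      show PySem.Chars.splitOn.go [d] (fuel + 1) [] cur acc = _
      simp [PySem.Chars.splitOn.go, mySplit, frontApp]
    | cons c rest =>
      show PySem.Chars.splitOn.go [d] (fuel + 1) (c :: rest) cur acc = _
      rw [PySem.Chars.splitOn.go]
      have hlen : rest.length < fuel := by simpa using h
      by_cases hc : c = d
      · have hpre : List.isPrefixOf [d] (c :: rest) = true := by
          simp [List.isPrefixOf, hc]
        simp only [hpre, if_true]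
        have : List.drop [d].length (c :: rest) = rest := by simp
        rw [this, ih rest [] (cur.reverse :: acc) hlen]
        simp only [List.reverse_cons, List.reverse_nil]
        rw [frontApp_nil _ (mySplit_ne_nil d rest)]
        rw [mySplit_cons]
        simp only [hc, beq_self_eq_true, if_true]
        simp [frontApp]
      · have hpre : List.isPrefixOf [d] (c :: rest) = false := by
          simp [List.isPrefixOf]
          exact fun h' => absurd h'.symm hc
        simp only [hpre, Bool.false_eq_true, if_false]
        rw [ih rest (c :: cur) acc hlen]
        rw [mySplit_cons]
        have hcd : (c == d) = false := by simp [hc]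
        simp only [hcd, Bool.false_eq_true, if_false]
        rcases hm : mySplit d rest with _ | ⟨w, ws⟩
        · exact absurd hm (mySplit_ne_nil d rest)
        · simp [frontApp, List.reverse_cons]

theorem splitOn_eq_mySplit (d : Char) (l : List Char) :
    PySem.Chars.splitOn l [d] = mySplit d l := by
  unfold PySem.Chars.splitOn
  rw [go_eq d (l.length + 1) l [] [] (by omega)]
  simp [frontApp_nil _ (mySplit_ne_nil d l)]

-- H in terms of the words of the normalized split
theorem H_eq_Q (l : List Char) : ∀ fd fc, H l fd fc = Q fd fc (mySplit ' ' (l.map normC)) := by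
  induction l with
  | nil => intro fd fc; simp [H, mySplit, Q]
  | cons c r ih =>
    intro fd fc
    by_cases hsep : sepC c
    · have hn : normC c = ' ' := by
        unfold sepC at hsep
        rcases Bool.or_eq_true_iff.mp hsep with h' | h' <;> simp [normC, beq_iff_eq.mp h']
      simp only [List.map_cons, hn]
      show H (c :: r) fd fc = Q fd fc (mySplit ' ' (' ' :: r.map normC))
      rw [mySplit_cons]
      simp only [beq_self_eq_true, if_true]
      rcases hm : mySplit ' ' (r.map normC) with _ | ⟨x, ws⟩
      · exact absurd hm (mySplit_ne_nil _ _)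
      · have hH : H (c :: r) fd fc = ((fd && !fc) || H r false false) := by
          simp only [H, hsep, if_true]
        have hQ : Q fd fc ([] :: x :: ws) = ((fd && !fc) || Q false false (x :: ws)) := by
          have h0 : Q fd fc ([] :: x :: ws)
              = (((fd || List.any [] aDigit) && !(fc || List.any [] aLetter))
                  || Q false false (x :: ws)) := rfl
          rw [h0]; simp
        rw [hH, hQ, ih false false, hm]
    · have hcs : (c == ' ') = false := by
        unfold sepC at hsep
        simp only [Bool.or_eq_true_iff] at hsep
        push_neg at hsep
        simpa using hsep.1
      have hn : normC c = c := by
        unfold sepC at hsep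
        simp only [Bool.or_eq_true_iff] at hsep
        push_neg at hsep
        simp [normC, hsep.2]
      simp only [List.map_cons, hn]
      show H (c :: r) fd fc = Q fd fc (mySplit ' ' (c :: r.map normC))
      rw [mySplit_cons]
      simp only [hcs, Bool.false_eq_true, if_false]
      rcases hm : mySplit ' ' (r.map normC) with _ | ⟨x, ws⟩
      · exact absurd hm (mySplit_ne_nil _ _)
      · show H (c :: r) fd fc = Q fd fc ((c :: x) :: ws)
        have hH : H (c :: r) fd fc =
            (if aLetter c then H r fd true else if aDigit c then H r true fc else H r fd fc) := by
          simp only [H, hsep, Bool.false_eq_true, if_false]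
        rw [hH]
        cases ws with
        | nil =>
          have h1 : Q fd fc [c :: x] = false := rfl
          rw [h1]
          by_cases hl : aLetter c
          · rw [if_pos hl, ih, hm]; rfl
          · by_cases hd : aDigit c
            · rw [if_neg hl, if_pos hd, ih, hm]; rfl
            · rw [if_neg hl, if_neg hd, ih, hm]; rfl
        | cons y ws' =>
          have hq : Q fd fc ((c :: x) :: y :: ws')
              = (((fd || (c :: x).any aDigit) && !(fc || (c :: x).any aLetter))
                  || Q false false (y :: ws')) := rfl
          have hq2 : ∀ fd' fc', Q fd' fc' (x :: y :: ws')
              = (((fd' || x.any aDigit) && !(fc' || x.any aLetter))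
                  || Q false false (y :: ws')) := fun _ _ => rfl
          rw [hq]
          simp only [List.any_cons]
          by_cases hl : aLetter c
          · have hd : aDigit c = false := by
              cases hdc : aDigit c
              · rfl
              · exact absurd hl (by simp [aDigit_not_aLetter c hdc])
            rw [if_pos hl, ih, hm, hq2]
            simp [hl, hd]
          · by_cases hd : aDigit c
            · rw [if_neg hl, if_pos hd, ih, hm, hq2]
              simp [hl, hd]
            · rw [if_neg hl, if_neg hd, ih, hm, hq2]
              simp [hl, hd]

theorem Q_eq_dropLast (ws : List (List Char)) :
    Q false false ws = ws.dropLast.any (fun w => w.any aDigit && !(w.any aLetter)) := by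
  induction ws with
  | nil => rfl
  | cons w rest ih =>
    cases rest with
    | nil => rfl
    | cons x ws' =>
      have hq : Q false false (w :: x :: ws')
          = (((false || w.any aDigit) && !(false || w.any aLetter)) || Q false false (x :: ws')) := rfl
      rw [hq, ih]
      simp [List.dropLast_cons₂]

-- chars of split words come from the source and are not the separator
theorem mem_mySplit (d : Char) (xs : List Char) :
    ∀ w ∈ mySplit d xs, ∀ c ∈ w, c ∈ xs ∧ c ≠ d := by
  induction xs with
  | nil => intro w hw c hc; simp [mySplit] at hw; subst hw; simp at hc
  | cons x r ih =>
    intro w hw c hc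
    rw [mySplit_cons] at hw
    by_cases hx : x == d
    · simp only [hx, if_true, List.mem_cons] at hw
      rcases hw with hw | hw
      · subst hw; simp at hc
      · have := ih w hw c hc; exact ⟨List.mem_cons_of_mem _ this.1, this.2⟩
    · simp only [hx, Bool.false_eq_true, if_false] at hw
      rcases hm : mySplit d r with _ | ⟨w₀, ws⟩
      · exact absurd hm (mySplit_ne_nil _ _)
      · rw [hm] at hw
        simp only [List.mem_cons] at hw
        rcases hw with hw | hw
        · subst hw
          rcases List.mem_cons.mp hc with hc | hc
          · subst hc; exact ⟨List.mem_cons_self, by simpa using hx⟩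
          · have := ih w₀ (by rw [hm]; exact List.mem_cons_self) c hc
            exact ⟨List.mem_cons_of_mem _ this.1, this.2⟩
        · have := ih w (by rw [hm]; exact List.mem_cons_of_mem _ hw) c hc
          exact ⟨List.mem_cons_of_mem _ this.1, this.2⟩

theorem word_pred_eq_strIsdigit (w : List Char) (h : ∀ c ∈ w, aLetter c = true ∨ aDigit c = true) :
    (w.any aDigit && !(w.any aLetter)) = PySem.Chars.strIsdigit w := by
  have hdig : PySem.Chars.isdigit = aDigit := rfl
  cases w with
  | nil => rfl
  | cons c r =>
    have hrhs : PySem.Chars.strIsdigit (c :: r) = (c :: r).all aDigit := by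
      unfold PySem.Chars.strIsdigit
      rw [hdig]
      simp
    rw [hrhs]
    cases hall : (c :: r).all aDigit
    · have hall' : ¬ ((c :: r).all aDigit = true) := by simp [hall]
      rw [List.all_eq_true] at hall'
      push_neg at hall'
      obtain ⟨x, hx, hxd⟩ := hall'
      have hxl : aLetter x = true := by
        rcases h x hx with h' | h'
        · exact h'
        · exact absurd h' hxd
      have : (c :: r).any aLetter = true := List.any_eq_true.mpr ⟨x, hx, hxl⟩
      simp [this]
    · have hany : (c :: r).any aDigit = true := by
        simp only [List.all_eq_true] at hall
        exact List.any_eq_true.mpr ⟨c, List.mem_cons_self, hall c List.mem_cons_self⟩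
      have hnol : (c :: r).any aLetter = false := by
        cases hl : (c :: r).any aLetter
        · rfl
        · obtain ⟨x, hx, hxl⟩ := List.any_eq_true.mp hl
          have := aDigit_not_aLetter x (by simp only [List.all_eq_true] at hall; exact hall x hx)
          rw [this] at hxl; exact absurd hxl (by simp)
      simp [hany, hnol]

theorem any_congr_mem {α : Type} (l : List α) (p q : α → Bool) (h : ∀ x ∈ l, p x = q x) :
    l.any p = l.any q := by
  induction l with
  | nil => rfl
  | cons a r ih =>
    simp only [List.any_cons]
    rw [h a List.mem_cons_self, ih (fun x hx => h x (List.mem_cons_of_mem _ hx))]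

theorem main_eq (l : List Char) :
    aLoop l '1' false false false =
      (if l.any (fun c => !bAllowed c) then false
       else if (l.zip (l.drop 1)).any (fun p => bUpper p.1 && bUpper p.2) then false
       else (PySem.Chars.splitOn (l.map fun c => if c == '.' then ' ' else c) [' ']).dropLast.any
          PySem.Chars.strIsdigit) := by
  have hfun : okA = bAllowed := funext okA_eq_bAllowed
  rw [aLoop_eq, noPair_one_cons, noPair_eq_zip]
  by_cases hany : (l.any fun c => !bAllowed c) = true
  · have hall : l.all okA = false := by
      obtain ⟨c, hc, hcb⟩ := List.any_eq_true.mp hany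
      cases hx : l.all okA
      · rfl
      · have := List.all_eq_true.mp hx c hc
        rw [hfun] at this
        rw [this] at hcb
        exact absurd hcb (by simp)
    simp [hany, hall]
  · have hall : l.all okA = true := by
      rw [hfun]
      refine List.all_eq_true.mpr ?_
      intro c hc
      by_contra hcb
      exact hany (List.any_eq_true.mpr ⟨c, hc, by simpa using hcb⟩)
    rw [if_neg hany, hall]
    by_cases hpair : ((l.zip (l.drop 1)).any fun p => bUpper p.1 && bUpper p.2) = true
    · rw [if_pos hpair, hpair]
      simp only [Bool.not_true, Bool.false_and, Bool.true_and, Bool.and_false]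
    · have hpair' : ((l.zip (l.drop 1)).any fun p => bUpper p.1 && bUpper p.2) = false := by
        simpa using hpair
      rw [if_neg hpair, hpair']
      simp only [Bool.true_and, Bool.not_false, Bool.false_or]
      have hnorm : (fun c : Char => if c == '.' then ' ' else c) = normC := rfl
      rw [hnorm, splitOn_eq_mySplit, H_eq_Q, Q_eq_dropLast]
      apply any_congr_mem
      intro w hw
      apply word_pred_eq_strIsdigit
      intro c hc
      have hw' : w ∈ mySplit ' ' (l.map normC) := List.dropLast_subset _ hw
      obtain ⟨hmem, hne⟩ := mem_mySplit ' ' (l.map normC) w hw' c hc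
      obtain ⟨c₀, hc₀, hceq⟩ := List.mem_map.mp hmem
      have hok₀ : okA c₀ = true := by
        have := List.all_eq_true.mp hall c₀ hc₀
        exact this
      have hcc : c = c₀ ∧ c₀ ≠ '.' := by
        unfold normC at hceq
        by_cases hdot : (c₀ == '.') = true
        · rw [if_pos hdot] at hceq; exact absurd hceq.symm hne
        · rw [if_neg hdot] at hceq
          exact ⟨hceq.symm, by simpa using hdot⟩
      obtain ⟨hcc, hd⟩ := hcc
      subst hcc
      unfold okA at hok₀
      simp only [Bool.or_eq_true_iff, beq_iff_eq] at hok₀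
      rcases hok₀ with (h' | h') | (h' | h')
      · exact Or.inl h'
      · exact Or.inr h'
      · exact absurd h' hd
      · exact absurd h' hne

-- ===== VERDICT (by name: the statement is the Claim_ definition above) =====
theorem valid_address_spec : Claim_equal_valid_address := by
  unfold Claim_equal_valid_address
  intro s _
  unfold Spec_valid_address valid_address valid_address_alt
  rw [show (if aLoop s.toList '1' false false false then true else false)
      = aLoop s.toList '1' false false false from by
    cases aLoop s.toList '1' false false false <;> rfl]
  exact main_eq s.toList
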